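-- pv_equiv track=rewrite | github.com/rayger14/Bull-machine- | engine/archetypes/archetype_spec.py | _parse_allowed_regimes
-- ===== SOURCE A (Python) =====
-- from typing import List, Dict, Optional, Literal
--
-- def _parse_allowed_regimes(regime_tags: List[str]) -> List[str]:
--     """
--     Parse regime tags into allowed regimes.
--
--     Handles both explicit regimes and tags like 'bear_market', 'crisis_periods'.
--     """
--     allowed = set()
--
--     for tag in regime_tags:
--         if tag in ['crisis', 'risk_off', 'neutral', 'risk_on']:
--             allowed.add(tag)
--         elif tag == 'bear_market':
--             allowed.update(['crisis', 'risk_off'])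
--         elif tag == 'bull_market':
--             allowed.update(['risk_on', 'neutral'])
--         elif tag == 'crisis_periods':
--             allowed.add('crisis')
--
--     # Default: allow all if no specific regimes specified
--     if not allowed:
--         allowed = {'crisis', 'risk_off', 'neutral', 'risk_on'}
--
--     return sorted(list(allowed))
-- ===== SOURCE B (Python) =====
-- # Inverted traversal: instead of expanding each input tag into regimes and
-- # sorting the accumulated set, iterate over the (already-sorted) regime
-- # universe and keep a regime iff any of its trigger tags occurs in the input.
-- _TRIGGERS = {
--     'crisis': ('crisis', 'bear_market', 'crisis_periods'),
--     'neutral': ('neutral', 'bull_market'),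
--     'risk_off': ('risk_off', 'bear_market'),
--     'risk_on': ('risk_on', 'bull_market'),
-- }
--
-- def _parse_allowed_regimes(regime_tags):
--     tags = set(regime_tags)
--     result = [r for r, trig in _TRIGGERS.items() if any(t in tags for t in trig)]
--     return result if result else list(_TRIGGERS)
-- ===== Notes on version B (the rewrite author's own statement) =====
-- stated objective: alternative
-- what changed: B inverts the traversal: instead of expanding each input tag into regimes, accumulating a set and sorting it, B builds a set of the input tags once and walks the fixed, already-sorted regime universe, keeping a regime iff one of its trigger tags occurs in the input (no per-tag dispatch and no output sort).
import Mathlib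
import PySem

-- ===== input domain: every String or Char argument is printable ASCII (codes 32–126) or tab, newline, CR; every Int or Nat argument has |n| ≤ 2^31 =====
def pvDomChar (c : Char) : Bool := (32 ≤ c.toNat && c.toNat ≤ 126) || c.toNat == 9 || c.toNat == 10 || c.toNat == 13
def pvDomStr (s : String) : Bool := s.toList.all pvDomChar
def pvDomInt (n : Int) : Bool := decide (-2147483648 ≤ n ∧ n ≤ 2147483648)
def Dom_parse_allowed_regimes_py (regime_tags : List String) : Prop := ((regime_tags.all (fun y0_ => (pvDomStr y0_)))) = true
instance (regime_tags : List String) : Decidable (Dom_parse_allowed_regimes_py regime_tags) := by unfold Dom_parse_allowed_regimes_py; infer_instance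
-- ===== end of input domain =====

-- B inverts the traversal: instead of expanding each tag into regimes and sorting
-- the accumulated set, it walks the sorted regime universe and keeps a regime iff
-- one of its trigger tags occurs in the input (alternative decomposition, not faster).


-- ===== PORT A =====
def stepA (allowed : PySem.Set String) (tag : String) : PySem.Set String :=
  if (["crisis", "risk_off", "neutral", "risk_on"] : List String).contains tag then
    PySem.Set.add allowed tag
  else if tag = "bear_market" then
    PySem.Set.update allowed ["crisis", "risk_off"]
  else if tag = "bull_market" then
    PySem.Set.update allowed ["risk_on", "neutral"]
  else if tag = "crisis_periods" then
    PySem.Set.add allowed "crisis"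
  else
    allowed

def parse_allowed_regimes_py (regime_tags : List String) : List String :=
  let allowed := regime_tags.foldl stepA PySem.Set.empty
  let allowed := if allowed = ([] : List String) then
      PySem.Set.ofList ["crisis", "risk_off", "neutral", "risk_on"]
    else allowed
  PySem.List.sorted allowed (fun x => x) false

-- ===== PORT B =====
def triggersTbl : List (String × List String) :=
  [("crisis", ["crisis", "bear_market", "crisis_periods"]),
   ("neutral", ["neutral", "bull_market"]),
   ("risk_off", ["risk_off", "bear_market"]),
   ("risk_on", ["risk_on", "bull_market"])]

def parse_allowed_regimes_py_alt (regime_tags : List String) : List String :=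
  let tags : PySem.Set String := PySem.Set.ofList regime_tags
  let result := (triggersTbl.filter (fun p => p.2.any (fun t => PySem.Set.contains tags t))).map Prod.fst
  if result = [] then triggersTbl.map Prod.fst else result

-- ===== PRECONDITION & SPEC =====
def Spec_parse_allowed_regimes_py (regime_tags : List String) (out : List String) : Prop := out = parse_allowed_regimes_py_alt regime_tags
instance (regime_tags : List String) (out : List String) : Decidable (Spec_parse_allowed_regimes_py regime_tags out) := by unfold Spec_parse_allowed_regimes_py; infer_instance

-- ===== CLAIM (what is proved, stated in full; the proofs are below) =====
def Claim_equal_parse_allowed_regimes_py : Prop := ∀ (regime_tags : List String), Dom_parse_allowed_regimes_py regime_tags → Spec_parse_allowed_regimes_py regime_tags (parse_allowed_regimes_py regime_tags)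

-- ===== LEMMAS AND PROOFS =====

-- the regimes A's branch for `tag` adds to the set
def contribL (tag : String) : List String :=
  if (["crisis", "risk_off", "neutral", "risk_on"] : List String).contains tag then [tag]
  else if tag = "bear_market" then ["crisis", "risk_off"]
  else if tag = "bull_market" then ["risk_on", "neutral"]
  else if tag = "crisis_periods" then ["crisis"]
  else []

theorem mem_stepA (s : PySem.Set String) (tag r : String) :
    r ∈ stepA s tag ↔ r ∈ s ∨ r ∈ contribL tag := by
  unfold stepA contribL
  split_ifs with h1 h2 h3 h4 <;>
    simp [PySem.Set.mem_add] <;> tauto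

theorem nodup_stepA (s : PySem.Set String) (tag : String) (hs : s.Nodup) :
    (stepA s tag).Nodup := by
  unfold stepA
  split_ifs <;>
    first
      | exact PySem.Set.nodup_add _ _ hs
      | exact PySem.Set.nodup_update _ _ hs
      | exact hs

theorem mem_foldlA (l : List String) (s : PySem.Set String) (r : String) :
    r ∈ l.foldl stepA s ↔ r ∈ s ∨ ∃ t ∈ l, r ∈ contribL t := by
  induction l generalizing s with
  | nil => simp
  | cons hd tl ih =>
    simp only [List.foldl_cons, ih, mem_stepA, List.mem_cons]
    constructor
    · rintro ((h | h) | ⟨t, ht, h⟩)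
      · exact Or.inl h
      · exact Or.inr ⟨hd, Or.inl rfl, h⟩
      · exact Or.inr ⟨t, Or.inr ht, h⟩
    · rintro (h | ⟨t, (rfl | ht), h⟩)
      · exact Or.inl (Or.inl h)
      · exact Or.inl (Or.inr h)
      · exact Or.inr ⟨t, ht, h⟩

theorem nodup_foldlA (l : List String) (s : PySem.Set String) (hs : s.Nodup) :
    (l.foldl stepA s).Nodup := by
  induction l generalizing s with
  | nil => exact hs
  | cons hd tl ih => exact ih _ (nodup_stepA _ _ hs)

theorem mem_contrib_iff (r t : String) :
    r ∈ contribL t ↔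
      (r = "crisis" ∧ (t = "crisis" ∨ t = "bear_market" ∨ t = "crisis_periods")) ∨
      (r = "neutral" ∧ (t = "neutral" ∨ t = "bull_market")) ∨
      (r = "risk_off" ∧ (t = "risk_off" ∨ t = "bear_market")) ∨
      (r = "risk_on" ∧ (t = "risk_on" ∨ t = "bull_market")) := by
  by_cases h1 : t = "crisis"
  · subst h1; simp [contribL]
  by_cases h2 : t = "risk_off"
  · subst h2; simp [contribL]
  by_cases h3 : t = "neutral"
  · subst h3; simp [contribL]
  by_cases h4 : t = "risk_on"
  · subst h4; simp [contribL]
  by_cases h5 : t = "bear_market"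
  · subst h5; simp [contribL]
  by_cases h6 : t = "bull_market"
  · subst h6; simp [contribL]; tauto
  by_cases h7 : t = "crisis_periods"
  · subst h7; simp [contribL]
  simp [contribL, h1, h2, h3, h4, h5, h6, h7]

-- membership in A's accumulated set, from the empty start
theorem mem_S_iff (tags : List String) (r : String) :
    r ∈ tags.foldl stepA PySem.Set.empty ↔ ∃ t ∈ tags, r ∈ contribL t := by
  rw [mem_foldlA]
  simp [PySem.Set.empty]

-- B's per-regime condition holds iff the regime is in A's accumulated set
theorem cond_iff (tags : List String) (r : String) (trig : List String)
    (hr : ∀ t, t ∈ trig ↔ r ∈ contribL t) :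
    (trig.any (fun t => PySem.Set.contains (PySem.Set.ofList tags) t)) = true ↔
      r ∈ tags.foldl stepA PySem.Set.empty := by
  rw [mem_S_iff]
  simp only [List.any_eq_true, PySem.Set.contains_iff, PySem.Set.mem_ofList]
  constructor
  · rintro ⟨t, ht, htags⟩
    exact ⟨t, htags, (hr t).1 ht⟩
  · rintro ⟨t, htags, hc⟩
    exact ⟨t, (hr t).2 hc, htags⟩

theorem contrib_sub_univ (r t : String) (h : r ∈ contribL t) :
    r ∈ (["crisis", "neutral", "risk_off", "risk_on"] : List String) := by
  rw [mem_contrib_iff] at h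
  rcases h with ⟨rfl, _⟩ | ⟨rfl, _⟩ | ⟨rfl, _⟩ | ⟨rfl, _⟩ <;> simp

theorem univ_pairwise_lt :
    (["crisis", "neutral", "risk_off", "risk_on"] : List String).Pairwise (fun a b => a < b) := by
  simp only [String.lt_iff_toList_lt, List.pairwise_cons, List.mem_cons, List.not_mem_nil,
    or_false, forall_eq_or_imp, forall_eq, false_implies, forall_const]
  decide

theorem result_eq_filter (tags : List String) :
    (triggersTbl.filter (fun p => p.2.any (fun t => PySem.Set.contains (PySem.Set.ofList tags) t))).map Prod.fst =
      (["crisis", "neutral", "risk_off", "risk_on"] : List String).filter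
        (fun r => decide (r ∈ tags.foldl stepA PySem.Set.empty)) := by
  have c1 := cond_iff tags "crisis" ["crisis", "bear_market", "crisis_periods"]
    (by intro t; rw [mem_contrib_iff]; simp)
  have c2 := cond_iff tags "neutral" ["neutral", "bull_market"]
    (by intro t; rw [mem_contrib_iff]; simp)
  have c3 := cond_iff tags "risk_off" ["risk_off", "bear_market"]
    (by intro t; rw [mem_contrib_iff]; simp)
  have c4 := cond_iff tags "risk_on" ["risk_on", "bull_market"]
    (by intro t; rw [mem_contrib_iff]; simp)
  have b1 : ((["crisis", "bear_market", "crisis_periods"] : List String).any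
      (fun t => PySem.Set.contains (PySem.Set.ofList tags) t)) =
      decide ("crisis" ∈ tags.foldl stepA PySem.Set.empty) := by
    by_cases h : "crisis" ∈ tags.foldl stepA PySem.Set.empty <;> simp_all
  have b2 : ((["neutral", "bull_market"] : List String).any
      (fun t => PySem.Set.contains (PySem.Set.ofList tags) t)) =
      decide ("neutral" ∈ tags.foldl stepA PySem.Set.empty) := by
    by_cases h : "neutral" ∈ tags.foldl stepA PySem.Set.empty <;> simp_all
  have b3 : ((["risk_off", "bear_market"] : List String).any
      (fun t => PySem.Set.contains (PySem.Set.ofList tags) t)) =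
      decide ("risk_off" ∈ tags.foldl stepA PySem.Set.empty) := by
    by_cases h : "risk_off" ∈ tags.foldl stepA PySem.Set.empty <;> simp_all
  have b4 : ((["risk_on", "bull_market"] : List String).any
      (fun t => PySem.Set.contains (PySem.Set.ofList tags) t)) =
      decide ("risk_on" ∈ tags.foldl stepA PySem.Set.empty) := by
    by_cases h : "risk_on" ∈ tags.foldl stepA PySem.Set.empty <;> simp_all
  simp only [PySem.Set.empty] at b1 b2 b3 b4
  simp only [triggersTbl, List.filter_cons, List.filter_nil, b1, b2, b3, b4, PySem.Set.empty]
  by_cases h1 : "crisis" ∈ List.foldl stepA ([] : List String) tags <;>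
    by_cases h2 : "neutral" ∈ List.foldl stepA ([] : List String) tags <;>
      by_cases h3 : "risk_off" ∈ List.foldl stepA ([] : List String) tags <;>
        by_cases h4 : "risk_on" ∈ List.foldl stepA ([] : List String) tags <;>
          simp [h1, h2, h3, h4]

-- ===== VERDICT (by name: the statement is the Claim_ definition above) =====
theorem parse_allowed_regimes_py_spec : Claim_equal_parse_allowed_regimes_py := by
  intro tags _
  unfold Spec_parse_allowed_regimes_py parse_allowed_regimes_py parse_allowed_regimes_py_alt
  simp only [result_eq_filter]
  set S := tags.foldl stepA PySem.Set.empty with hS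
  by_cases hempty : S = ([] : List String)
  · rw [if_pos hempty]
    have hfe : (["crisis", "neutral", "risk_off", "risk_on"] : List String).filter
        (fun r => decide (r ∈ S)) = [] := by
      rw [hempty]; decide
    rw [hfe, if_pos rfl]
    have hperm0 : (triggersTbl.map Prod.fst).Perm
        (PySem.Set.ofList ["crisis", "risk_off", "neutral", "risk_on"]) := by decide
    have hpw0 : (triggersTbl.map Prod.fst).Pairwise (fun a b : String => a ≤ b) := by
      simpa [triggersTbl] using univ_pairwise_lt.imp (fun h => le_of_lt h)
    apply PySem.List.sorted_id_eq_of_perm_of_pairwise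
    all_goals first | exact hperm0 | exact hpw0
  · rw [if_neg hempty]
    have hnodup : S.Nodup := nodup_foldlA tags _ (by simp [PySem.Set.empty])
    have hsub : ∀ r ∈ S, r ∈ (["crisis", "neutral", "risk_off", "risk_on"] : List String) := by
      intro r hr
      rw [hS, mem_S_iff] at hr
      rcases hr with ⟨t, _, h⟩
      exact contrib_sub_univ r t h
    have hperm : ((["crisis", "neutral", "risk_off", "risk_on"] : List String).filter
        (fun r => decide (r ∈ S))).Perm S := by
      rw [List.perm_ext_iff_of_nodup (List.Nodup.filter _ (by decide)) hnodup]
      intro x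
      simp only [List.mem_filter, decide_eq_true_eq]
      exact ⟨fun ⟨_, h⟩ => h, fun h => ⟨hsub x h, h⟩⟩
    have hne : (["crisis", "neutral", "risk_off", "risk_on"] : List String).filter
        (fun r => decide (r ∈ S)) ≠ [] := by
      intro hnil
      rw [hnil] at hperm
      exact hempty (hperm.symm.eq_nil)
    rw [if_neg hne]
    have hpw : ((["crisis", "neutral", "risk_off", "risk_on"] : List String).filter
        (fun r => decide (r ∈ S))).Pairwise (fun a b => (fun x : String => x) a < (fun x : String => x) b) :=
      List.Pairwise.sublist List.filter_sublist univ_pairwise_lt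
    apply PySem.List.sorted_eq_of_perm_of_pairwise_lt (key := fun x : String => x)
    all_goals first | exact hperm | exact hpw
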